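-- pv_equiv track=rewrite | github.com/hail-is/hail | hail/python/hailtop/utils/utils.py | grouped
-- ===== SOURCE A (Python) =====
-- from typing import (Any, Callable, TypeVar, Awaitable, Mapping, Optional, Type, List, Dict, Iterable, Tuple,
--                     Generic, cast, AsyncIterator, Iterator, Union)
-- import itertools
--
-- T = TypeVar('T')  # pylint: disable=invalid-name
--
-- def grouped(n: int, ls: Iterable[T]) -> Iterable[List[T]]:  # replace with itertools.batched in Python 3.12
--     it = iter(ls)
--     if n < 1:
--         raise ValueError('invalid value for n: found {n}')
--     while True:
--         group = list(itertools.islice(it, n))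
--         if len(group) == 0:
--             break
--         yield group
-- ===== SOURCE B (Python) =====
-- def grouped(n, ls):
--     it = iter(ls)
--     if n < 1:
--         raise ValueError('invalid value for n: found {n}')
--     group = []
--     for x in it:
--         group.append(x)
--         if len(group) == n:
--             yield group
--             group = []
--     if group:
--         yield group
-- ===== Notes on version B (the rewrite author's own statement) =====
-- stated objective: alternative
-- what changed: Replaces repeated itertools.islice batch-slicing in a while-True loop with a single for-loop that accumulates elements into a buffer and yields it each time it reaches size n (plus a final non-empty remainder).
import Mathlib
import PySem

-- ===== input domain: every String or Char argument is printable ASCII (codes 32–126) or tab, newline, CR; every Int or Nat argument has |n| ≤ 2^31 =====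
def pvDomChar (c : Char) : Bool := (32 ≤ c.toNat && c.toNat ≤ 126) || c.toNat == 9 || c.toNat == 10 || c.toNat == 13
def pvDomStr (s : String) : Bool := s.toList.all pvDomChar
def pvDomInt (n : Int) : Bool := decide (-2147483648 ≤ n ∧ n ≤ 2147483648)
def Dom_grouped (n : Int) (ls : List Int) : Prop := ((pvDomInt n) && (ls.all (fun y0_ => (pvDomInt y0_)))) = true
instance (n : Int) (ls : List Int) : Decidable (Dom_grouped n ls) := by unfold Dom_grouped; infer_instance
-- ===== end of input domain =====

-- B replaces repeated islice batch-slicing with per-element accumulation into a buffer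
-- yielded whenever it reaches size n (alternative decomposition, same cost).
-- Both programs raise ValueError for n < 1, excluded by Pre_grouped.

-- ===== PORT A =====
-- while True: group = list(islice(it, n)); if empty break; yield group.
-- Each islice takes the next n elements; modelled as take/drop on the remaining list.
def groupedA (m : Nat) : List Int → List (List Int)
  | [] => []
  | x :: rest => (x :: rest.take (m - 1)) :: groupedA m (rest.drop (m - 1))
termination_by ls => ls.length
decreasing_by
  simp only [List.length_cons, List.length_drop]
  omega

def grouped (n : Int) (ls : List Int) : List (List Int) :=
  if n < 1 then [] else groupedA n.toNat ls

-- ===== PORT B =====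
-- for x in it: append to group; if len(group) == n: yield group; group = [] — then final
-- non-empty group yielded after the loop.
def groupedB (m : Nat) (group : List Int) : List Int → List (List Int)
  | [] => if group = [] then [] else [group]
  | x :: rest =>
      let g := group ++ [x]
      if g.length = m then g :: groupedB m [] rest else groupedB m g rest

def grouped_alt (n : Int) (ls : List Int) : List (List Int) :=
  if n < 1 then [] else groupedB n.toNat [] ls

-- ===== PRECONDITION & SPEC =====
-- Pre_ excludes exactly n < 1, on which the Python generators raise ValueError.
def Pre_grouped (n : Int) (ls : List Int) : Prop := 1 ≤ n
instance (n : Int) (ls : List Int) : Decidable (Pre_grouped n ls) := by unfold Pre_grouped; infer_instance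
def pvWitness_grouped : Int × List Int := (2, [1, 2, 3])

def Spec_grouped (n : Int) (ls : List Int) (out : List (List Int)) : Prop := out = grouped_alt n ls
instance (n : Int) (ls : List Int) (out : List (List Int)) : Decidable (Spec_grouped n ls out) := by unfold Spec_grouped; infer_instance

-- ===== CLAIM (what is proved, stated in full; the proofs are below) =====
def Claim_equal_grouped : Prop := ∀ (n : Int) (ls : List Int), Dom_grouped n ls → Pre_grouped n ls → Spec_grouped n ls (grouped n ls)

-- ===== LEMMAS AND PROOFS =====

-- Buffer invariant: a non-empty buffer with room left is completed by the next
-- m - group.length elements, after which B continues with an empty buffer.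
theorem groupedB_buffer (m : Nat) :
    ∀ (ls group : List Int), group ≠ [] → group.length < m →
      groupedB m group ls
        = (group ++ ls.take (m - group.length)) :: groupedB m [] (ls.drop (m - group.length)) := by
  intro ls
  induction ls with
  | nil =>
      intro group hne _
      simp [groupedB, hne]
  | cons x rest ih =>
      intro group hne hlt
      simp only [groupedB]
      by_cases hfull : (group ++ [x]).length = m
      · simp only [hfull, if_true]
        have h1 : m - group.length = 1 := by
          simp [List.length_append] at hfull; omega
        simp [h1]
      · simp only [if_neg hfull]
        have hlen : (group ++ [x]).length < m := by
          simp [List.length_append] at hfull ⊢; omega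
        have hne' : group ++ [x] ≠ [] := by simp
        rw [ih (group ++ [x]) hne' hlen]
        have h2 : 2 ≤ m - group.length := by
          simp [List.length_append] at hfull hlen; omega
        have htake : (x :: rest).take (m - group.length)
            = x :: rest.take (m - group.length - 1) := by
          cases h : m - group.length with
          | zero => omega
          | succ k => simp
        have hdrop : (x :: rest).drop (m - group.length)
            = rest.drop (m - group.length - 1) := by
          cases h : m - group.length with
          | zero => omega
          | succ k => simp
        have hlen2 : m - (group ++ [x]).length = m - group.length - 1 := by
          simp [List.length_append]; omega
        rw [htake, hdrop, hlen2]
        simp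

-- With an empty buffer B performs exactly A's chunk step.
theorem groupedB_eq_groupedA (m : Nat) (hm : 1 ≤ m) :
    ∀ (ls : List Int), groupedA m ls = groupedB m [] ls := by
  intro ls
  induction hls : ls.length using Nat.strong_induction_on generalizing ls with
  | _ k ih =>
      cases ls with
      | nil => simp [groupedA, groupedB]
      | cons x rest =>
          simp only [groupedA, groupedB, List.nil_append]
          by_cases h1 : m = 1
          · subst h1
            subst hls
            simp [ih rest.length (by simp) rest rfl]
          · have hlt : ([x] : List Int).length < m := by simp; omega
            rw [if_neg (by simp; omega)]
            rw [groupedB_buffer m rest [x] (by simp) hlt]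
            have hm1 : m - ([x] : List Int).length = m - 1 := by simp
            rw [hm1]
            subst hls
            have hdl : (rest.drop (m - 1)).length < (x :: rest).length := by
              simp only [List.length_drop, List.length_cons]
              omega
            rw [← ih (rest.drop (m - 1)).length hdl (rest.drop (m - 1)) rfl]
            simp

-- ===== VERDICT (by name: the statement is the Claim_ definition above) =====
theorem grouped_spec : Claim_equal_grouped := by
  intro n ls _ hpre
  unfold Spec_grouped grouped grouped_alt
  have hn : ¬ n < 1 := by exact not_lt.mpr hpre
  rw [if_neg hn, if_neg hn]
  exact groupedB_eq_groupedA n.toNat (by omega) ls
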